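-- pv_equiv track=rewrite | github.com/Ryo23sanyu/Infraprotect-deployloy | infra/デバッグ用6.py | insert_line_breaks_on_commas
-- ===== SOURCE A (Python) =====
-- def insert_line_breaks_on_commas(text):
--     # コンマのカウントと改行の挿入を行う
--     count = 0
--     new_text = ''
--     for char in text:
--         if char == ',':
--             count += 1
--             if count % 3 == 0:
--                 # 3, 6, 9番目のコンマの後に改行タグを挿入
--                 new_text += ',</br>'
--                 continue
--         new_text += char
--     return new_text
-- ===== SOURCE B (Python) =====
-- def insert_line_breaks_on_commas(text):
--     # Split on commas, then rebuild: segment index i equals the i-th comma;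
--     # every third comma gets the break tag attached.
--     parts = text.split(',')
--     pieces = [parts[0]]
--     for i in range(1, len(parts)):
--         pieces.append(',</br>' if i % 3 == 0 else ',')
--         pieces.append(parts[i])
--     return ''.join(pieces)
-- ===== Notes on version B (the rewrite author's own statement) =====
-- stated objective: simpler
-- what changed: Replaces A's stateful character-by-character scan (comma counter carried through the loop) with a split-on-comma then indexed rejoin, the segment index serving as the comma count; the work moves into C-level str.split/str.join, a constant-factor speedup.
import Mathlib
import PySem

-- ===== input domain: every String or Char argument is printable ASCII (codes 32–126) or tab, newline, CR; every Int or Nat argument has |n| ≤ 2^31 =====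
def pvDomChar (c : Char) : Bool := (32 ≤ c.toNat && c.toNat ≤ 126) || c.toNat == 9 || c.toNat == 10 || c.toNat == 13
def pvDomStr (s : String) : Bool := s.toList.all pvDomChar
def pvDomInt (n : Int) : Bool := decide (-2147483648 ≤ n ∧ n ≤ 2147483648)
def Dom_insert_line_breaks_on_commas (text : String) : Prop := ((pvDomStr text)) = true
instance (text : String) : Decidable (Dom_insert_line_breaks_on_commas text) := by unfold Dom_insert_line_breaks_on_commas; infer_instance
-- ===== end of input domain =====

-- B replaces A's stateful char-by-char scan with a split-on-comma / indexed rejoin (objective: simpler); return values agree on all inputs.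

-- ===== PORT A =====
-- the loop body; the loop state is (count, new_text), with new_text kept as a List Char
def pvStepA (st : Int × List Char) (char : Char) : Int × List Char :=
  if char = ',' then
    let count := st.1 + 1
    if PySem.Int.mod count 3 = 0 then (count, st.2 ++ (',' :: '<' :: '/' :: 'b' :: 'r' :: '>' :: []))
    else (count, st.2 ++ [char])
  else (st.1, st.2 ++ [char])

def insert_line_breaks_on_commas (text : String) : String :=
  String.ofList (text.toList.foldl pvStepA (0, [])).2

-- ===== PORT B =====
-- parts = text.split(',') is always nonempty, so every index below is in range (parts[0], parts[i] never raise)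
def insert_line_breaks_on_commas_alt (text : String) : String :=
  let parts := (PySem.Str.split? text ",").getD []
  let pieces := (PySem.List.pyRange 1 (parts.length : Int) 1).foldl
      (fun (acc : List String) i =>
        acc ++ [if PySem.Int.mod i 3 = 0 then ",</br>" else ","] ++ [PySem.List.pyGetD parts i ""])
      [PySem.List.pyGetD parts 0 ""]
  PySem.Str.join "" pieces

-- ===== PRECONDITION & SPEC =====
def Spec_insert_line_breaks_on_commas (text : String) (out : String) : Prop := out = insert_line_breaks_on_commas_alt text
instance (text : String) (out : String) : Decidable (Spec_insert_line_breaks_on_commas text out) := by unfold Spec_insert_line_breaks_on_commas; infer_instance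

-- ===== CLAIM (what is proved, stated in full; the proofs are below) =====
def Claim_equal_insert_line_breaks_on_commas : Prop := ∀ (text : String), Dom_insert_line_breaks_on_commas text → Spec_insert_line_breaks_on_commas text (insert_line_breaks_on_commas text)

-- ===== LEMMAS AND PROOFS =====

-- the piece emitted for the j-th comma
def pvSep (j : Int) : List Char :=
  if PySem.Int.mod j 3 = 0 then (',' :: '<' :: '/' :: 'b' :: 'r' :: '>' :: []) else [',']

-- A's output on the remaining characters, given the number of commas already seen
def pvSpec (c : Int) : List Char → List Char
  | [] => []
  | x :: xs => if x = ',' then pvSep (c + 1) ++ pvSpec (c + 1) xs else x :: pvSpec c xs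

-- structural version of splitting a char list on ','
def pvSplit : List Char → List (List Char)
  | [] => [[]]
  | x :: xs =>
    if x = ',' then [] :: pvSplit xs
    else match pvSplit xs with
      | [] => [[x]]
      | p :: ps => (x :: p) :: ps

-- glue back: before parts[j] (j ≥ 1) comes the j-th separator
def pvGlue (j : Int) : List (List Char) → List Char
  | [] => []
  | p :: ps => pvSep j ++ p ++ pvGlue (j + 1) ps

def pvConsHead (x : List Char) : List (List Char) → List (List Char)
  | [] => [x]
  | p :: ps => (x ++ p) :: ps

theorem pvSplit_ne_nil (l : List Char) : pvSplit l ≠ [] := by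
  cases l with
  | nil => simp [pvSplit]
  | cons x xs =>
    simp only [pvSplit]
    split_ifs
    · simp
    · cases h : pvSplit xs <;> simp

theorem pvFoldA (l : List Char) (c : Int) (acc : List Char) :
    (l.foldl pvStepA (c, acc)).2 = acc ++ pvSpec c l := by
  induction l generalizing c acc with
  | nil => simp [pvSpec]
  | cons x xs ih =>
    rw [List.foldl_cons]
    by_cases hx : x = ','
    · subst hx
      by_cases hm : (3 : Int) ∣ (c + 1)
      · have h1 : pvStepA (c, acc) ',' = (c + 1, acc ++ (',' :: '<' :: '/' :: 'b' :: 'r' :: '>' :: [])) := by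
          simp [pvStepA, hm]
        rw [h1, ih]; simp [pvSpec, pvSep, hm]
      · have h1 : pvStepA (c, acc) ',' = (c + 1, acc ++ [',']) := by
          simp [pvStepA, hm]
        rw [h1, ih]; simp [pvSpec, pvSep, hm]
    · have h1 : pvStepA (c, acc) x = (c, acc ++ [x]) := by
        simp [pvStepA, hx]
      rw [h1, ih]; simp [pvSpec, hx]

theorem pvGo_eq (l : List Char) : ∀ (fuel : Nat), l.length ≤ fuel → ∀ (cur : List Char) (acc : List (List Char)),
    PySem.Chars.splitOn.go [','] fuel l cur acc = acc.reverse ++ pvConsHead cur.reverse (pvSplit l) := by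
  induction l with
  | nil =>
    intro fuel _ cur acc
    cases fuel <;> simp [PySem.Chars.splitOn.go, pvSplit, pvConsHead]
  | cons x xs ih =>
    intro fuel hf cur acc
    cases fuel with
    | zero => simp at hf
    | succ f =>
      have hxs : xs.length ≤ f := by simpa using hf
      by_cases hx : x = ','
      · subst hx
        rw [show PySem.Chars.splitOn.go [','] (f + 1) (',' :: xs) cur acc
              = PySem.Chars.splitOn.go [','] f xs [] (cur.reverse :: acc) by
            simp [PySem.Chars.splitOn.go, List.isPrefixOf]]
        rw [ih f hxs [] (cur.reverse :: acc)]
        simp [pvSplit]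
        cases h : pvSplit xs with
        | nil => exact absurd h (pvSplit_ne_nil xs)
        | cons p ps => simp [pvConsHead]
      · rw [show PySem.Chars.splitOn.go [','] (f + 1) (x :: xs) cur acc
              = PySem.Chars.splitOn.go [','] f xs (x :: cur) acc by
            · simp [PySem.Chars.splitOn.go, List.isPrefixOf]
              intro h; exact absurd h.symm hx]
        rw [ih f hxs (x :: cur) acc]
        cases h : pvSplit xs with
        | nil => exact absurd h (pvSplit_ne_nil xs)
        | cons p ps => simp [pvSplit, hx, h, pvConsHead]

theorem pvSplitOn_eq (l : List Char) : PySem.Chars.splitOn l [','] = pvSplit l := by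
  rw [PySem.Chars.splitOn, pvGo_eq l (l.length + 1) (by omega) [] []]
  cases h : pvSplit l with
  | nil => exact absurd h (pvSplit_ne_nil l)
  | cons p ps => simp [pvConsHead]

theorem pvMain (s : List Char) (c : Int) :
    pvSpec c s = (pvSplit s).headI ++ pvGlue (c + 1) (pvSplit s).tail := by
  induction s generalizing c with
  | nil => simp [pvSpec, pvSplit, pvGlue]
  | cons x xs ih =>
    by_cases hx : x = ','
    · subst hx
      cases h : pvSplit xs with
      | nil => exact absurd h (pvSplit_ne_nil xs)
      | cons p ps =>
        simp only [pvSpec, pvSplit, ih (c + 1), h, List.headI, List.tail]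
        simp [pvGlue]
    · cases h : pvSplit xs with
      | nil => exact absurd h (pvSplit_ne_nil xs)
      | cons p ps =>
        simp only [pvSpec, pvSplit, if_neg hx, ih c, h, List.headI, List.tail]
        simp

-- map a function through B's building loop
theorem pvMapFold (l : List Int) (f g : Int → String) (init : List String) :
    (l.foldl (fun acc i => acc ++ [f i] ++ [g i]) init).map String.toList
      = l.foldl (fun acc i => acc ++ [(f i).toList] ++ [(g i).toList]) (init.map String.toList) := by
  induction l generalizing init with
  | nil => rfl
  | cons x xs ih => simp [Function.comp_def]

theorem pvIntercalate_nil (xs : List (List Char)) : List.intercalate [] xs = xs.flatten := by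
  induction xs with
  | nil => rfl
  | cons x xs ih =>
    cases xs with
    | nil => simp [List.intercalate]
    | cons y ys => simpa [List.intercalate] using congrArg (x ++ ·) (by simpa [List.intercalate] using ih)

theorem pvFoldB (full : List (List Char)) (m : Nat) : ∀ (k : Nat), full.length ≤ k + m →
    ∀ (acc : List (List Char)),
    ((PySem.List.pyRange (k : Int) (full.length : Int) 1).foldl
        (fun acc i => acc ++ [pvSep i] ++ [PySem.List.pyGetD full i []]) acc).flatten
      = acc.flatten ++ pvGlue (k : Int) (full.drop k) := by
  induction m with
  | zero =>
    intro k hk acc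
    rw [PySem.List.pyRange_one_eq_nil (by exact_mod_cast by omega)]
    have hd : List.drop k full = [] := List.drop_eq_nil_of_le (by omega)
    simp [hd, pvGlue]
  | succ m ih =>
    intro k hk acc
    by_cases h : full.length ≤ k
    · rw [PySem.List.pyRange_one_eq_nil (by exact_mod_cast h)]
      have hd : List.drop k full = [] := List.drop_eq_nil_of_le h
      simp [hd, pvGlue]
    · rw [Nat.not_le] at h
      rw [PySem.List.pyRange_one_cons (by exact_mod_cast h)]
      simp only [List.foldl_cons]
      rw [show ((k : Int) + 1) = ((k + 1 : Nat) : Int) by push_cast; ring]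
      rw [ih (k + 1) (by omega)]
      rw [PySem.List.pyGetD_eq_getElem full [] (by positivity) (by exact_mod_cast h)]
      rw [List.drop_eq_getElem_cons h]
      simp [pvGlue]

theorem pvA_toList (text : String) :
    (insert_line_breaks_on_commas text).toList = pvSpec 0 text.toList := by
  unfold insert_line_breaks_on_commas
  simp [pvFoldA text.toList 0 []]

theorem pvParts_eq (text : String) :
    ((PySem.Str.split? text ",").getD []) = (pvSplit text.toList).map String.ofList := by
  rw [PySem.Str.split?]
  rw [show ("," : String).toList = [','] from by decide]
  rw [PySem.Chars.split?]
  simp [pvSplitOn_eq]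

theorem pvAlt_toList (text : String) :
    (insert_line_breaks_on_commas_alt text).toList
      = (pvSplit text.toList).headI ++ pvGlue 1 (pvSplit text.toList).tail := by
  unfold insert_line_breaks_on_commas_alt
  rw [pvParts_eq]
  have hne := pvSplit_ne_nil text.toList
  set cps := pvSplit text.toList with hcps
  have hlen : 0 < cps.length := List.length_pos_iff.mpr hne
  rw [PySem.Str.toList_join, PySem.Chars.join]
  rw [show ("" : String).toList = ([] : List Char) from rfl]
  rw [pvIntercalate_nil]
  rw [List.length_map]
  rw [pvMapFold]
  have hstep : (fun (acc : List (List Char)) i =>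
        acc ++ [(if PySem.Int.mod i 3 = 0 then (",</br>" : String) else ",").toList]
          ++ [(PySem.List.pyGetD (cps.map String.ofList) i "").toList])
      = (fun (acc : List (List Char)) i => acc ++ [pvSep i] ++ [PySem.List.pyGetD cps i []]) := by
    funext acc i
    have h1 : (if PySem.Int.mod i 3 = 0 then (",</br>" : String) else ",").toList = pvSep i := by
      unfold pvSep
      by_cases hm : PySem.Int.mod i 3 = 0
      · rw [if_pos hm, if_pos hm]; decide
      · rw [if_neg hm, if_neg hm]; decide
    have h2 : (PySem.List.pyGetD (cps.map String.ofList) i "").toList = PySem.List.pyGetD cps i [] := by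
      rw [show ("" : String) = String.ofList [] from by decide]
      rw [PySem.List.pyGetD_map String.ofList cps i []]
      simp
    rw [h1, h2]
  rw [hstep]
  have h0 : (PySem.List.pyGetD (cps.map String.ofList) 0 "").toList = PySem.List.pyGetD cps 0 [] := by
    rw [show ("" : String) = String.ofList [] from by decide]
    rw [PySem.List.pyGetD_map String.ofList cps 0 []]
    simp
  rw [List.map_cons, List.map_nil, h0]
  have hB := pvFoldB cps cps.length 1 (by omega) [PySem.List.pyGetD cps 0 []]
  simp only [Nat.cast_one] at hB
  rw [hB]
  rw [PySem.List.pyGetD_eq_getElem cps [] (by omega) (by exact_mod_cast hlen)]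
  obtain ⟨p, ps, hpp⟩ := List.exists_cons_of_ne_nil hne
  simp [hpp, List.headI]

-- ===== VERDICT (by name: the statement is the Claim_ definition above) =====
theorem insert_line_breaks_on_commas_spec : Claim_equal_insert_line_breaks_on_commas := by
  intro text _
  unfold Spec_insert_line_breaks_on_commas
  apply String.toList_inj.mp
  rw [pvA_toList, pvAlt_toList, pvMain text.toList 0]
  norm_num
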